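-- pv_equiv track=rewrite | github.com/RAVNUS-INC/kotify | app/web.py | phone_fmt
-- ===== SOURCE A (Python) =====
-- def phone_fmt(value: str | None) -> str:
--     """전화번호를 표시용으로 포맷팅한다.
--
--     입력은 정규화된 숫자만 (예: '01012345678', '0212345678').
--     출력은 하이픈 포맷:
--     - 휴대폰 11자리: 010-1234-5678
--     - 휴대폰 10자리: 011-123-4567
--     - 서울 02 9-10자리: 02-1234-5678 / 02-123-4567
--     - 그 외 지역번호 10-11자리: 031-1234-5678
--     - 매치 안 되면 원본 반환
--
--     Args:
--         value: 정규화된 전화번호 문자열 또는 None.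
--
--     Returns:
--         하이픈이 포함된 표시용 문자열.
--     """
--     if not value:
--         return ""
--     digits = "".join(c for c in value if c.isdigit())
--     if not digits:
--         return value
--     # 휴대폰 (010, 011, 016, 017, 018, 019)
--     if digits.startswith("01") and len(digits) == 11:
--         return f"{digits[:3]}-{digits[3:7]}-{digits[7:]}"
--     if digits.startswith("01") and len(digits) == 10:
--         return f"{digits[:3]}-{digits[3:6]}-{digits[6:]}"
--     # 서울 02
--     if digits.startswith("02") and len(digits) == 10:
--         return f"{digits[:2]}-{digits[2:6]}-{digits[6:]}"
--     if digits.startswith("02") and len(digits) == 9: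
--         return f"{digits[:2]}-{digits[2:5]}-{digits[5:]}"
--     # 지역번호 03x ~ 06x (10~11자리)
--     if len(digits) == 11:
--         return f"{digits[:3]}-{digits[3:7]}-{digits[7:]}"
--     if len(digits) == 10:
--         return f"{digits[:3]}-{digits[3:6]}-{digits[6:]}"
--     # 인터넷 070, 050x 등
--     if digits.startswith("070") and len(digits) == 11:
--         return f"{digits[:3]}-{digits[3:7]}-{digits[7:]}"
--     return value
-- ===== SOURCE B (Python) =====
-- def phone_fmt(value):
--     if not value:
--         return ""
--     digits = "".join(c for c in value if c.isdigit())
--     if not digits: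
--         return value
--     # Area-code length is 2 only for Seoul '02' numbers short enough to use it;
--     # the middle group is whatever remains after the area code and the final 4.
--     area = 2 if digits.startswith("02") and len(digits) <= 10 else 3
--     mid = len(digits) - 4 - area
--     if mid not in (3, 4):
--         return value
--     # single backward pass: emit a hyphen at the two computed break offsets
--     out = []
--     for k, c in enumerate(reversed(digits)):
--         if k == 4 or k == 4 + mid:
--             out.append('-')
--         out.append(c)
--     return "".join(reversed(out))
-- ===== Notes on version B (the rewrite author's own statement) =====
-- stated objective: alternative
-- what changed: Replaced the chain of seven prefix/length f-string branches by one arithmetic rule (area-code length = 2 for short Seoul '02' numbers else 3, middle group = n-4-area, valid iff middle is 3 or 4) and a single backward character pass that emits hyphens at the two computed break offsets.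
import Mathlib
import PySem

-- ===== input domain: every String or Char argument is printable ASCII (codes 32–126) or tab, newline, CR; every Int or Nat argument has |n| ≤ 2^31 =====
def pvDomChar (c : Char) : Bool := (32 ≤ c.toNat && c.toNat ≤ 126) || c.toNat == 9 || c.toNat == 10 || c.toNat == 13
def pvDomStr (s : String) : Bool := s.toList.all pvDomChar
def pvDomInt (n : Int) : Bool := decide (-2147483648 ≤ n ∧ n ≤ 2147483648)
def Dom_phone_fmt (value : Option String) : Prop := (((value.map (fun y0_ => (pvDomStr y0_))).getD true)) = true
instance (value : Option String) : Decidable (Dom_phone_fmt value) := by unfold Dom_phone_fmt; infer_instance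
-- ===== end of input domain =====

-- B replaces A's chain of per-case prefix/length f-string branches by one arithmetic rule
-- (area-code length, middle-group length) and a single backward pass over the digits that
-- emits hyphens at the two computed break offsets (objective: alternative).

-- ===== PORT A =====
def phone_fmt (value : Option String) : String :=
  match value with
  | none => ""
  | some s =>
    if s.toList = [] then ""
    else
      let digits := s.toList.filter (fun c => PySem.Chars.isdigit c)
      if digits = [] then s
      else
        if PySem.Chars.startswith digits ['0','1'] && digits.length == 11 then
          String.ofList (PySem.List.slice digits none (some 3) ++ '-' ::
            PySem.List.slice digits (some 3) (some 7) ++ '-' :: PySem.List.slice digits (some 7) none)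
        else if PySem.Chars.startswith digits ['0','1'] && digits.length == 10 then
          String.ofList (PySem.List.slice digits none (some 3) ++ '-' ::
            PySem.List.slice digits (some 3) (some 6) ++ '-' :: PySem.List.slice digits (some 6) none)
        else if PySem.Chars.startswith digits ['0','2'] && digits.length == 10 then
          String.ofList (PySem.List.slice digits none (some 2) ++ '-' ::
            PySem.List.slice digits (some 2) (some 6) ++ '-' :: PySem.List.slice digits (some 6) none)
        else if PySem.Chars.startswith digits ['0','2'] && digits.length == 9 then
          String.ofList (PySem.List.slice digits none (some 2) ++ '-' ::
            PySem.List.slice digits (some 2) (some 5) ++ '-' :: PySem.List.slice digits (some 5) none)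
        else if digits.length == 11 then
          String.ofList (PySem.List.slice digits none (some 3) ++ '-' ::
            PySem.List.slice digits (some 3) (some 7) ++ '-' :: PySem.List.slice digits (some 7) none)
        else if digits.length == 10 then
          String.ofList (PySem.List.slice digits none (some 3) ++ '-' ::
            PySem.List.slice digits (some 3) (some 6) ++ '-' :: PySem.List.slice digits (some 6) none)
        else if PySem.Chars.startswith digits ['0','7','0'] && digits.length == 11 then
          String.ofList (PySem.List.slice digits none (some 3) ++ '-' ::
            PySem.List.slice digits (some 3) (some 7) ++ '-' :: PySem.List.slice digits (some 7) none)
        else s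
-- ===== PORT B =====
-- the backward pass of Source B: for k, c in enumerate(reversed(digits)), hyphen at k = 4 and k = 4 + mid
def pvHyphLoop (digits : List Char) (mid : Int) : List Char :=
  ((PySem.List.enumerate digits.reverse).foldl
    (fun acc kc => acc ++ ((if kc.1 == 4 || kc.1 == 4 + mid then ['-'] else []) ++ [kc.2])) []).reverse
def phone_fmt_alt (value : Option String) : String :=
  match value with
  | none => ""
  | some s =>
    if s.toList = [] then ""
    else
      let digits := s.toList.filter (fun c => PySem.Chars.isdigit c)
      if digits = [] then s
      else
        let area : Int :=
          if PySem.Chars.startswith digits ['0','2'] ∧ digits.length ≤ 10 then 2 else 3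
        let mid : Int := (digits.length : Int) - 4 - area
        if ¬ (mid = 3 ∨ mid = 4) then s
        else String.ofList (pvHyphLoop digits mid)

-- ===== PRECONDITION & SPEC =====
def Spec_phone_fmt (value : Option String) (out : String) : Prop := out = phone_fmt_alt value
instance (value : Option String) (out : String) : Decidable (Spec_phone_fmt value out) := by unfold Spec_phone_fmt; infer_instance

-- ===== CLAIM (what is proved, stated in full; the proofs are below) =====
def Claim_equal_phone_fmt : Prop := ∀ (value : Option String), Dom_phone_fmt value → Spec_phone_fmt value (phone_fmt value)

-- ===== LEMMAS AND PROOFS =====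
lemma pvLoop11 (ds : List Char) (h : ds.length = 11) :
    pvHyphLoop ds 4 =
      PySem.List.slice ds none (some 3) ++ '-' ::
        PySem.List.slice ds (some 3) (some 7) ++ '-' :: PySem.List.slice ds (some 7) none := by
  rcases ds with _ | ⟨c0, ds⟩; · simp at h
  rcases ds with _ | ⟨c1, ds⟩; · simp at h
  rcases ds with _ | ⟨c2, ds⟩; · simp at h
  rcases ds with _ | ⟨c3, ds⟩; · simp at h
  rcases ds with _ | ⟨c4, ds⟩; · simp at h
  rcases ds with _ | ⟨c5, ds⟩; · simp at h
  rcases ds with _ | ⟨c6, ds⟩; · simp at h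
  rcases ds with _ | ⟨c7, ds⟩; · simp at h
  rcases ds with _ | ⟨c8, ds⟩; · simp at h
  rcases ds with _ | ⟨c9, ds⟩; · simp at h
  rcases ds with _ | ⟨c10, ds⟩; · simp at h
  rcases ds with _ | ⟨c11, ds⟩
  · rfl
  · simp at h
lemma pvLoop10 (ds : List Char) (h : ds.length = 10) :
    pvHyphLoop ds 3 =
      PySem.List.slice ds none (some 3) ++ '-' ::
        PySem.List.slice ds (some 3) (some 6) ++ '-' :: PySem.List.slice ds (some 6) none := by
  rcases ds with _ | ⟨c0, ds⟩; · simp at h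
  rcases ds with _ | ⟨c1, ds⟩; · simp at h
  rcases ds with _ | ⟨c2, ds⟩; · simp at h
  rcases ds with _ | ⟨c3, ds⟩; · simp at h
  rcases ds with _ | ⟨c4, ds⟩; · simp at h
  rcases ds with _ | ⟨c5, ds⟩; · simp at h
  rcases ds with _ | ⟨c6, ds⟩; · simp at h
  rcases ds with _ | ⟨c7, ds⟩; · simp at h
  rcases ds with _ | ⟨c8, ds⟩; · simp at h
  rcases ds with _ | ⟨c9, ds⟩; · simp at h
  rcases ds with _ | ⟨c10, ds⟩
  · rfl
  · simp at h
lemma pvLoop02_10 (ds : List Char) (h : ds.length = 10) :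
    pvHyphLoop ds 4 =
      PySem.List.slice ds none (some 2) ++ '-' ::
        PySem.List.slice ds (some 2) (some 6) ++ '-' :: PySem.List.slice ds (some 6) none := by
  rcases ds with _ | ⟨c0, ds⟩; · simp at h
  rcases ds with _ | ⟨c1, ds⟩; · simp at h
  rcases ds with _ | ⟨c2, ds⟩; · simp at h
  rcases ds with _ | ⟨c3, ds⟩; · simp at h
  rcases ds with _ | ⟨c4, ds⟩; · simp at h
  rcases ds with _ | ⟨c5, ds⟩; · simp at h
  rcases ds with _ | ⟨c6, ds⟩; · simp at h
  rcases ds with _ | ⟨c7, ds⟩; · simp at h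
  rcases ds with _ | ⟨c8, ds⟩; · simp at h
  rcases ds with _ | ⟨c9, ds⟩; · simp at h
  rcases ds with _ | ⟨c10, ds⟩
  · rfl
  · simp at h
lemma pvLoop02_9 (ds : List Char) (h : ds.length = 9) :
    pvHyphLoop ds 3 =
      PySem.List.slice ds none (some 2) ++ '-' ::
        PySem.List.slice ds (some 2) (some 5) ++ '-' :: PySem.List.slice ds (some 5) none := by
  rcases ds with _ | ⟨c0, ds⟩; · simp at h
  rcases ds with _ | ⟨c1, ds⟩; · simp at h
  rcases ds with _ | ⟨c2, ds⟩; · simp at h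
  rcases ds with _ | ⟨c3, ds⟩; · simp at h
  rcases ds with _ | ⟨c4, ds⟩; · simp at h
  rcases ds with _ | ⟨c5, ds⟩; · simp at h
  rcases ds with _ | ⟨c6, ds⟩; · simp at h
  rcases ds with _ | ⟨c7, ds⟩; · simp at h
  rcases ds with _ | ⟨c8, ds⟩; · simp at h
  rcases ds with _ | ⟨c9, ds⟩
  · rfl
  · simp at h
lemma pvNotSw02 (ds : List Char) (h : PySem.Chars.startswith ds ['0','1'] = true) :
    PySem.Chars.startswith ds ['0','2'] = false := by
  rw [PySem.Chars.startswith_iff] at h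
  obtain ⟨t, rfl⟩ := h
  cases hp : PySem.Chars.startswith (['0','1'] ++ t) ['0','2']
  · rfl
  · rw [PySem.Chars.startswith_iff] at hp
    obtain ⟨u, hu⟩ := hp
    simp at hu

-- ===== VERDICT (by name: the statement is the Claim_ definition above) =====
theorem phone_fmt_spec : Claim_equal_phone_fmt := by
  intro value _
  show phone_fmt value = phone_fmt_alt value
  cases value with
  | none => rfl
  | some s =>
    simp only [phone_fmt, phone_fmt_alt]
    by_cases h0 : s.toList = []
    · simp [h0]
    · rw [if_neg h0, if_neg h0]
      generalize (s.toList.filter (fun c => PySem.Chars.isdigit c)) = ds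
      by_cases hd : ds = []
      · simp [hd]
      · rw [if_neg hd, if_neg hd]
        by_cases h2 : PySem.Chars.startswith ds ['0','2'] = true
        · have h1 : PySem.Chars.startswith ds ['0','1'] = false := by
            cases hq : PySem.Chars.startswith ds ['0','1']
            · rfl
            · exact absurd h2 (by simp [pvNotSw02 ds hq])
          by_cases h10 : ds.length = 10
          · simp [h1, h2, h10, pvLoop02_10 ds h10]
          · by_cases h9 : ds.length = 9
            · simp [h1, h2, h9, pvLoop02_9 ds h9]
            · by_cases h11 : ds.length = 11
              · have hle : ¬ (ds.length ≤ 10) := by omega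
                simp [h1, h2, h11, pvLoop11 ds h11]
              · have hA11 : ¬((ds.length : Int) = 11) := by omega
                have hA10 : ¬((ds.length : Int) = 10) := by omega
                by_cases hle : ds.length ≤ 10
                · have hm : ¬(((ds.length : Int) - 4 - 2 = 3) ∨ ((ds.length : Int) - 4 - 2 = 4)) := by omega
                  simp [h1, h2, h9, h10, h11, hle, hm, beq_iff_eq]
                · have hm : ¬(((ds.length : Int) - 4 - 3 = 3) ∨ ((ds.length : Int) - 4 - 3 = 4)) := by omega
                  simp [h1, h2, h9, h10, h11, hle, hm, beq_iff_eq]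
        · by_cases h11 : ds.length = 11
          · simp [h2, h11, pvLoop11 ds h11]
          · by_cases h10 : ds.length = 10
            · simp [h2, h10, pvLoop10 ds h10]
            · have hA11 : ¬((ds.length : Int) = 11) := by omega
              have hA10 : ¬((ds.length : Int) = 10) := by omega
              have hm : ¬(((ds.length : Int) - 4 - 3 = 3) ∨ ((ds.length : Int) - 4 - 3 = 4)) := by omega
              simp [h2, h10, h11, hm, beq_iff_eq]
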